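-- pv_equiv track=rewrite | github.com/Akash-Verma-learns/ssc1_rag | rules/risk_engine.py | _is_uncapped
-- ===== SOURCE A (Python) =====
-- def _is_uncapped(text: str) -> bool:
--     """Check if text suggests no cap / unlimited liability."""
--     uncapped_phrases = [
--         "unlimited", "uncapped", "no cap", "no limit", "without limit",
--         "without any limit", "without any cap", "not limited", "not capped",
--         "full liability", "entire liability",
--     ]
--     t = text.lower()
--     return any(p in t for p in uncapped_phrases)
-- ===== SOURCE B (Python) =====
-- _PHRASES = [
--     "unlimited", "uncapped", "no cap", "no limit", "without limit",
--     "without any limit", "without any cap", "not limited", "not capped",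
--     "full liability", "entire liability",
-- ]
--
-- def _is_uncapped(text: str) -> bool:
--     """Check if text suggests no cap / unlimited liability."""
--     # Single left-to-right pass: keep the suffixes of all partially-matched
--     # phrases as active states; a phrase is found when a state empties.
--     active = []
--     for ch in text.lower():
--         nxt = []
--         for s in active:
--             if s[0] == ch:
--                 nxt.append(s[1:])
--         for p in _PHRASES:
--             if p[0] == ch:
--                 nxt.append(p[1:])
--         if any(s == "" for s in nxt):
--             return True
--         active = nxt
--     return False
-- ===== Notes on version B (the rewrite author's own statement) =====
-- stated objective: alternative
-- what changed: Replaced the per-phrase substring scan (one 'p in t' pass per phrase) by a single left-to-right pass that simulates a multi-pattern matcher: it maintains the set of partially-matched phrase suffixes as active states, advancing/spawning them per character and returning True as soon as a state empties.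
import Mathlib
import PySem

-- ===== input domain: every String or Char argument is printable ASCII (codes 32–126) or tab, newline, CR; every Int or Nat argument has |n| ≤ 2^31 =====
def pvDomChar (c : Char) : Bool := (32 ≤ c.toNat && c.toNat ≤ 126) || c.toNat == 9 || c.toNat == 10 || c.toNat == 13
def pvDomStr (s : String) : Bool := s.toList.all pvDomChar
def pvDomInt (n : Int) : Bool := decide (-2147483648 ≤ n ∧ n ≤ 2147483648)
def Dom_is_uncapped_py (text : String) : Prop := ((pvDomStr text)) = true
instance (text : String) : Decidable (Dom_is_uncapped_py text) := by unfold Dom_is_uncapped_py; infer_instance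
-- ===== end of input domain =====

-- B replaces A's one-substring-scan-per-phrase with a single left-to-right pass that
-- simulates a multi-pattern matcher over active partial-match states (alternative; same result).

-- ===== PORT A =====
def is_uncapped_py (text : String) : Bool :=
  let uncapped_phrases : List String :=
    ["unlimited", "uncapped", "no cap", "no limit", "without limit",
     "without any limit", "without any cap", "not limited", "not capped",
     "full liability", "entire liability"]
  let t := PySem.Str.lower text
  uncapped_phrases.any (fun p => PySem.Str.isIn p t)

-- ===== PORT B =====
-- The module constant _PHRASES of Source B, as lists of characters.
def pvPhrases : List (List Char) :=
  ["unlimited".toList, "uncapped".toList, "no cap".toList, "no limit".toList,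
   "without limit".toList, "without any limit".toList, "without any cap".toList,
   "not limited".toList, "not capped".toList, "full liability".toList,
   "entire liability".toList]

-- 'if s[0] == ch: nxt.append(s[1:])' as a filterMap step (none = state dropped).
def pvAdvance (c : Char) (s : List Char) : Option (List Char) :=
  match s with
  | [] => none
  | c0 :: rest => if c0 = c then some rest else none

-- Source B's loop: advance active states, spawn fresh phrase states, early-return on a
-- completed (empty) state, else continue with the new state list.
def pvScan (active : List (List Char)) (cs : List Char) : Bool :=
  match cs with
  | [] => false
  | c :: cs' =>
    let nxt := active.filterMap (pvAdvance c) ++ pvPhrases.filterMap (pvAdvance c)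
    if nxt.any List.isEmpty then true else pvScan nxt cs'

def is_uncapped_py_alt (text : String) : Bool :=
  pvScan [] (PySem.Chars.lower text.toList)

-- ===== PRECONDITION & SPEC =====
def Spec_is_uncapped_py (text : String) (out : Bool) : Prop := out = is_uncapped_py_alt text
instance (text : String) (out : Bool) : Decidable (Spec_is_uncapped_py text out) := by unfold Spec_is_uncapped_py; infer_instance

-- ===== CLAIM (what is proved, stated in full; the proofs are below) =====
def Claim_equal_is_uncapped_py : Prop := ∀ (text : String), Dom_is_uncapped_py text → Spec_is_uncapped_py text (is_uncapped_py text)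

-- ===== LEMMAS AND PROOFS =====

theorem pvPhrases_ne_nil : ∀ p ∈ pvPhrases, p ≠ [] := by decide

theorem pvAdvance_eq_some (c : Char) (s s' : List Char) :
    pvAdvance c s = some s' ↔ s = c :: s' := by
  cases s with
  | nil => simp [pvAdvance]
  | cons c0 rest =>
    simp only [pvAdvance]
    split_ifs with h
    · subst h; constructor
      · intro hs; injection hs with hs; rw [hs]
      · intro hs; injection hs with h1 h2; rw [h2]
    · constructor
      · intro hs; exact absurd hs (by simp)
      · intro hs; injection hs with h1 h2; exact absurd h1 h

-- Characterisation of the scan: it succeeds iff some active state is a nonempty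
-- prefix of the remaining text, or some phrase occurs inside the remaining text.
theorem pvScan_iff (cs : List Char) : ∀ (active : List (List Char)),
    pvScan active cs = true ↔
      (∃ s ∈ active, s ≠ [] ∧ s <+: cs) ∨ (∃ p ∈ pvPhrases, p <:+: cs) := by
  induction cs with
  | nil =>
    intro active
    simp only [pvScan]
    constructor
    · intro h; exact absurd h (by simp)
    · rintro (⟨s, _, hne, hpre⟩ | ⟨p, hp, hinf⟩)
      · exact absurd (List.prefix_nil.mp hpre) hne
      · exact absurd (List.infix_nil.mp hinf) (pvPhrases_ne_nil p hp)
  | cons c cs' ih =>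
    intro active
    simp only [pvScan]
    -- membership in the advanced state list
    have hmem : ∀ (L : List (List Char)) (s' : List Char),
        s' ∈ L.filterMap (pvAdvance c) ↔ ∃ s ∈ L, s = c :: s' := by
      intro L s'
      rw [List.mem_filterMap]
      constructor
      · rintro ⟨s, hs, h⟩; exact ⟨s, hs, (pvAdvance_eq_some c s s').mp h⟩
      · rintro ⟨s, hs, h⟩; exact ⟨s, hs, (pvAdvance_eq_some c s s').mpr h⟩
    set nxt := active.filterMap (pvAdvance c) ++ pvPhrases.filterMap (pvAdvance c) with hnxt
    have hmemnxt : ∀ s', s' ∈ nxt ↔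
        (∃ s ∈ active, s = c :: s') ∨ (∃ p ∈ pvPhrases, p = c :: s') := by
      intro s'; rw [hnxt, List.mem_append, hmem, hmem]
    -- the right-hand side, decomposed along the first character
    have hrhs : ((∃ s ∈ active, s ≠ [] ∧ s <+: c :: cs') ∨ (∃ p ∈ pvPhrases, p <:+: c :: cs')) ↔
        ((∃ s' ∈ nxt, s' <+: cs') ∨ (∃ p ∈ pvPhrases, p <:+: cs')) := by
      constructor
      · rintro (⟨s, hs, hne, hpre⟩ | ⟨p, hp, hinf⟩)
        · obtain ⟨c0, s', rfl⟩ := List.exists_cons_of_ne_nil hne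
          obtain ⟨rfl, hpre'⟩ := by
            rw [List.cons_prefix_cons] at hpre; exact hpre
          exact Or.inl ⟨s', (hmemnxt s').mpr (Or.inl ⟨_, hs, rfl⟩), hpre'⟩
        · rcases (List.infix_cons_iff).mp hinf with hpre | hinf'
          · obtain ⟨c0, p', rfl⟩ := List.exists_cons_of_ne_nil (pvPhrases_ne_nil p hp)
            obtain ⟨rfl, hpre'⟩ := by
              rw [List.cons_prefix_cons] at hpre; exact hpre
            exact Or.inl ⟨p', (hmemnxt p').mpr (Or.inr ⟨_, hp, rfl⟩), hpre'⟩
          · exact Or.inr ⟨p, hp, hinf'⟩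
      · rintro (⟨s', hs', hpre⟩ | ⟨p, hp, hinf⟩)
        · rcases (hmemnxt s').mp hs' with ⟨s, hs, rfl⟩ | ⟨p, hp, rfl⟩
          · exact Or.inl ⟨c :: s', hs, by simp, List.cons_prefix_cons.mpr ⟨rfl, hpre⟩⟩
          · exact Or.inr ⟨c :: s', hp,
              (List.infix_cons_iff).mpr (Or.inl (List.cons_prefix_cons.mpr ⟨rfl, hpre⟩))⟩
        · exact Or.inr ⟨p, hp, (List.infix_cons_iff).mpr (Or.inr hinf)⟩
    rw [hrhs]
    split_ifs with hemp
    · -- some state just completed: the RHS holds via that empty state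
      simp only [true_iff]
      rw [List.any_eq_true] at hemp
      obtain ⟨s', hs', he⟩ := hemp
      rw [List.isEmpty_iff] at he
      subst he
      exact Or.inl ⟨[], hs', List.nil_prefix⟩
    · -- no completed state: an active-state prefix of cs' must be nonempty
      rw [ih nxt]
      rw [Bool.not_eq_true, List.any_eq_false] at hemp
      constructor
      · rintro (⟨s', hs', _, hpre⟩ | h)
        · exact Or.inl ⟨s', hs', hpre⟩
        · exact Or.inr h
      · rintro (⟨s', hs', hpre⟩ | h)
        · refine Or.inl ⟨s', hs', ?_, hpre⟩
          intro hnil; subst hnil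
          exact (hemp [] hs') (by simp)
        · exact Or.inr h

-- A's string phrase list maps onto B's character-list phrase table.
theorem pvPhrases_map :
    (["unlimited", "uncapped", "no cap", "no limit", "without limit",
      "without any limit", "without any cap", "not limited", "not capped",
      "full liability", "entire liability"] : List String).map String.toList = pvPhrases := by
  decide

-- ===== VERDICT (by name: the statement is the Claim_ definition above) =====
theorem is_uncapped_py_spec : Claim_equal_is_uncapped_py := by
  intro text _
  unfold Spec_is_uncapped_py is_uncapped_py is_uncapped_py_alt
  rw [Bool.eq_iff_iff]
  rw [pvScan_iff]
  simp only [List.any_eq_true, PySem.Str.isIn_eq, PySem.Str.toList_lower,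
    PySem.Chars.isIn_iff_infix]
  rw [← pvPhrases_map]
  simp only [List.mem_map]
  constructor
  · rintro ⟨p, hp, hinf⟩
    exact Or.inr ⟨p.toList, ⟨p, hp, rfl⟩, hinf⟩
  · rintro (⟨s, hs, _, _⟩ | ⟨q, ⟨p, hp, rfl⟩, hinf⟩)
    · exact absurd hs (List.not_mem_nil)
    · exact ⟨p, hp, hinf⟩
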